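-- pv_equiv track=rewrite | github.com/sonnbeom/SWEA | TIL/October/2nd_week/프로그래머스_주사위 고르기.py | solution
-- ===== SOURCE A (Python) =====
-- import itertools
--
-- def binary_search(now, other_case):
--     low = 0
--     high = len(other_case) - 1
--
--     while low <= high:
--         mid = (low + high) // 2
--
--         if other_case[mid] < now:
--             low = mid + 1
--         else:
--             high = mid - 1
--     return low
--
-- def dfs(case, dice, depth, now, res):
--     # 깊이(더한 주사위들의 갯수)가 case의 길이와 같다면 리턴 case의 길이: 각 경우의 수
--     if len(case) == depth:
--         res.append(now)
--         return
--     dice_idx = case[depth]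
--     for d in dice[dice_idx]:
--         dfs(case, dice, depth + 1, now + d, res)
--
-- def solution(dice):
--     answer = []
--     li = [i for i in range(len(dice))]
--     half = len(dice) // 2
--     # 주사위를 선택할 수 있는 조합의 경우를 찾기
--     cases = list(itertools.combinations(li, half))
--     sum_cases = {}
--
--     for idx, case in enumerate(cases):
--         res = []
--         # 주사위들의 합
--         dfs(case, dice, 0, 0, res)
--         # 바이너리 서치를 위해 정렬
--         res.sort()
--         # 인덱스를 키로 저장 cases에서 값을 가져오기 위함
--         sum_cases[idx] = res
--     max_sum = 0
--     case_len = len(cases)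
--     for idx, value in sum_cases.items():
--         # 나
--         my_case = value
--         # 상대방 반대편이므로
--         other_case = sum_cases[case_len - 1 - idx]
--
--         temp_sum = 0
--         for num in my_case:
--             temp_sum += binary_search(num, other_case)
--
--         if temp_sum > max_sum:
--             max_sum = temp_sum
--             # itertools.combinations는 튜플을 반환한다. (0,1), (1,2)
--             temp_best_case = list(cases[idx])
--             temp_best_case.sort()
--             answer = temp_best_case
--     # 인덱스이므로 +1
--     for i in range(len(answer)):
--         answer[i] += 1
--     return answer
-- ===== SOURCE B (Python) =====
-- import itertools
--
-- def solution(dice):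
--     n = len(dice)
--     cases = list(itertools.combinations(range(n), n // 2))
--     # histogram of attainable sums for each chosen multiset of dice (convolution)
--     hists = []
--     for case in cases:
--         h = {0: 1}
--         for i in case:
--             nh = {}
--             for s, c in h.items():
--                 for f in dice[i]:
--                     nh[s + f] = nh.get(s + f, 0) + c
--             h = nh
--         hists.append(h)
--     m = len(cases)
--     best = []
--     best_wins = 0
--     for idx, h in enumerate(hists):
--         other = hists[m - 1 - idx]
--         # count wins by a sorted merge with a running prefix of the opponent's histogram
--         ot = [(t, other[t]) for t in sorted(other)]
--         j = 0
--         acc = 0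
--         wins = 0
--         for s in sorted(h):
--             while j < len(ot) and ot[j][0] < s:
--                 acc += ot[j][1]
--                 j += 1
--             wins += h[s] * acc
--         if wins > best_wins:
--             best_wins = wins
--             best = list(cases[idx])
--     return [i + 1 for i in best]
-- ===== Notes on version B (the rewrite author's own statement) =====
-- stated objective: faster
-- what changed: B replaces A's per-combination DFS enumeration of all 6^(n/2) face-sums plus per-element binary search by a dict-histogram of sums built by convolution over the chosen dice, and counts wins with a single sorted merge carrying a prefix sum of the opponent's histogram.
import Mathlib
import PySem

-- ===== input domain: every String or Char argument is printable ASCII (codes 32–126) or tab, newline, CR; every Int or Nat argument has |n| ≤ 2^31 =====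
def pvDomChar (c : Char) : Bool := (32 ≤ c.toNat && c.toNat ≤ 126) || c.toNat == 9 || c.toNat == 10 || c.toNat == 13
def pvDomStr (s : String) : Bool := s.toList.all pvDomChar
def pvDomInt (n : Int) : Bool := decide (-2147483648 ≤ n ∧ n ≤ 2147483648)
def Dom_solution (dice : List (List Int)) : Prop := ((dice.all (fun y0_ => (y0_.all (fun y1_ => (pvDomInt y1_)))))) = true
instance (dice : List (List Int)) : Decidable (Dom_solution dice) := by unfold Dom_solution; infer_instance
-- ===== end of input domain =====

-- B builds each combination's sum distribution as a dict histogram by convolution and counts wins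
-- with one sorted merge (prefix sums), instead of A's DFS enumeration of all face-sums + binary search.


-- ===== PORT A =====

-- while low <= high: mid = (low+high)//2; if other_case[mid] < now: low = mid+1 else high = mid-1
def bsLoop (other_case : List Int) (now : Int) (low high : Int) : Int :=
  if h : low ≤ high then
    let mid := PySem.Int.floordiv (low + high) 2
    match PySem.List.pyGet? other_case mid with
    | some v => if v < now then bsLoop other_case now (mid + 1) high
                else bsLoop other_case now low (mid - 1)
    | none => low  -- unreachable in A's calls (0 ≤ low ≤ mid ≤ high < len; Python would raise IndexError)
  else low
termination_by (high + 1 - low).toNat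
decreasing_by
  · have := PySem.Int.floordiv_two_mid_bounds h; omega
  · have := PySem.Int.floordiv_two_mid_bounds h; omega

def binary_search (now : Int) (other_case : List Int) : Int :=
  bsLoop other_case now 0 ((other_case.length : Int) - 1)

-- helper fact the recursion of dfs needs (a successful index read is below the length)
theorem pvPyGet?_lt {α : Type} (xs : List α) (i : Int) (v : α)
    (h : PySem.List.pyGet? xs i = some v) : i < (xs.length : Int) := by
  by_contra hn
  rw [(PySem.List.pyGet?_eq_none_iff xs i).2 (by simp [PySem.Raise.InRange]; omega)] at h
  simp at h

-- res is the accumulator Python mutates; the return value is the final res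
def dfs (case : List Int) (dice : List (List Int)) (depth : Int) (now : Int) (res : List Int) :
    List Int :=
  if (case.length : Int) = depth then res ++ [now]
  else
    match h : PySem.List.pyGet? case depth with
    | none => res  -- unreachable (Python IndexError); A calls dfs with 0 ≤ depth ≤ len(case)
    | some dice_idx =>
        ((PySem.List.pyGet? dice dice_idx).getD []).attach.foldl
          (fun r d => dfs case dice (depth + 1) (now + d.1) r) res
termination_by ((case.length : Int) + 1 - depth).toNat
decreasing_by have := pvPyGet?_lt case depth dice_idx h; omega

def solution (dice : List (List Int)) : List Int :=
  let answer : List Int := []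
  let li : List Int := PySem.List.pyRange 0 (PySem.List.len dice) 1
  let half : Nat := dice.length / 2   -- len(dice) // 2 (length nonneg: Nat division is Python's floor)
  let cases : List (List Int) := PySem.List.combinations li half
  let sum_cases : PySem.Dict Int (List Int) :=
    (PySem.List.enumerate cases 0).foldl
      (fun d p => d.insert p.1 (PySem.List.sorted (dfs p.2 dice 0 0 []) (fun x => x) false))
      PySem.Dict.empty
  let case_len : Int := PySem.List.len cases
  let st : Int × List Int :=
    sum_cases.items.foldl
      (fun st p =>
        let my_case := p.2
        -- sum_cases[case_len - 1 - idx]: key always present (Python raises KeyError otherwise)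
        let other_case := (sum_cases.get? (case_len - 1 - p.1)).getD []
        let temp_sum := my_case.foldl (fun t num => t + binary_search num other_case) 0
        if st.1 < temp_sum then
          -- temp_best_case = list(cases[idx]); temp_best_case.sort()
          (temp_sum, PySem.List.sorted ((PySem.List.pyGet? cases p.1).getD []) (fun x => x) false)
        else st)
      (0, answer)
  st.2.map (fun x => x + 1)   -- for i in range(len(answer)): answer[i] += 1

-- ===== PORT B =====

-- one convolution step: nh[s+f] = nh.get(s+f, 0) + c for every (s, c) in h.items(), f in faces
def convStep (h : PySem.Dict Int Int) (faces : List Int) : PySem.Dict Int Int :=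
  h.items.foldl
    (fun nh p => faces.foldl (fun nh2 f => nh2.insert (p.1 + f) (nh2.getD (p.1 + f) 0 + p.2)) nh)
    PySem.Dict.empty

def histOf (dice : List (List Int)) (case : List Int) : PySem.Dict Int Int :=
  case.foldl (fun h i => convStep h ((PySem.List.pyGet? dice i).getD []))
    ((PySem.Dict.empty : PySem.Dict Int Int).insert 0 1)

-- the Source B pointer loop 'while j < len(ot) and ot[j][0] < s: acc += ot[j][1]; j += 1',
-- with rem = ot[j:] (advancing j = consuming the front of rem); exact
def advance (rem : List (Int × Int)) (s : Int) (acc : Int) : List (Int × Int) × Int :=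
  match rem with
  | [] => ([], acc)
  | (t, d) :: rest => if t < s then advance rest s (acc + d) else ((t, d) :: rest, acc)

-- for s in sorted(h): … ; wins += h[s] * acc
def winsLoop (h : PySem.Dict Int Int) (keys : List Int) (rem : List (Int × Int))
    (acc wins : Int) : Int :=
  match keys with
  | [] => wins
  | s :: ks =>
      let r := advance rem s acc
      winsLoop h ks r.1 r.2 (wins + h.getD s 0 * r.2)

def solution_alt (dice : List (List Int)) : List Int :=
  let cases : List (List Int) :=
    PySem.List.combinations (PySem.List.pyRange 0 (PySem.List.len dice) 1) (dice.length / 2)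
  let hists := cases.map (histOf dice)
  let m : Int := PySem.List.len cases
  let st : List Int × Int :=
    (PySem.List.enumerate hists 0).foldl
      (fun st p =>
        let other := (PySem.List.pyGet? hists (m - 1 - p.1)).getD PySem.Dict.empty
        let ot := (PySem.List.sorted other.keys (fun x => x) false).map (fun t => (t, other.getD t 0))
        let wins := winsLoop p.2 (PySem.List.sorted p.2.keys (fun x => x) false) ot 0 0
        if st.2 < wins then (((PySem.List.pyGet? cases p.1).getD []), wins) else st)
      ([], 0)
  st.1.map (fun i => i + 1)

-- ===== PRECONDITION & SPEC =====
def Spec_solution (dice : List (List Int)) (out : List Int) : Prop := out = solution_alt dice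
instance (dice : List (List Int)) (out : List Int) : Decidable (Spec_solution dice out) := by unfold Spec_solution; infer_instance

-- ===== CLAIM (what is proved, stated in full; the proofs are below) =====
def Claim_equal_solution : Prop := ∀ (dice : List (List Int)), Dom_solution dice → Spec_solution dice (solution dice)

-- ===== LEMMAS AND PROOFS =====

-- ---------- counting helper ----------
theorem pv_countP_eq (p : Int → Bool) (oc : List Int) (r : Nat) (hr : r ≤ oc.length)
    (hc : ∀ (i : Nat) (h : i < oc.length), (p oc[i] = true ↔ i < r)) :
    oc.countP p = r := by
  conv_lhs => rw [← List.take_append_drop r oc]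
  rw [List.countP_append]
  have h1 : (oc.take r).countP p = (oc.take r).length := by
    apply List.countP_eq_length.mpr
    intro a ha
    obtain ⟨i, hi, rfl⟩ := List.mem_iff_getElem.1 ha
    have hi' : i < oc.length := lt_of_lt_of_le hi (by simp)
    simp only [List.getElem_take]
    exact (hc i hi').mpr (by simp at hi; omega)
  have h2 : (oc.drop r).countP p = 0 := by
    apply List.countP_eq_zero.mpr
    intro a ha
    obtain ⟨i, hi, rfl⟩ := List.mem_iff_getElem.1 ha
    have hi' : r + i < oc.length := by simp at hi; omega
    simp only [List.getElem_drop]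
    intro hp
    have := (hc (r + i) hi').1 hp
    omega
  simp [h1, h2, List.length_take]
  omega

-- ---------- A's binary search counts the opponent sums below `now` ----------
theorem bsLoop_eq (oc : List Int) (now : Int) (hs : oc.Pairwise (· ≤ ·)) :
    ∀ (fuel : Nat) (low high : Int), (high + 1 - low).toNat ≤ fuel → 0 ≤ low →
      high < (oc.length : Int) → low ≤ high + 1 →
      (∀ (i : Nat) (hi : i < oc.length),
        ((i : Int) < low → oc[i] < now) ∧ (high < (i : Int) → ¬ oc[i] < now)) →
      bsLoop oc now low high = ((oc.countP (fun y => decide (y < now)) : Nat) : Int) := by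
  have hpg := List.pairwise_iff_getElem.1 hs
  intro fuel
  induction fuel with
  | zero =>
      intro low high hf h0 h1 h2 hinv
      have hlh : ¬ low ≤ high := by omega
      rw [bsLoop, dif_neg hlh]
      have hlow : low = high + 1 := by omega
      have : oc.countP (fun y => decide (y < now)) = low.toNat := by
        apply pv_countP_eq _ _ _ (by omega)
        intro i hi
        constructor
        · intro hp
          by_contra hni
          have := (hinv i hi).2 (by omega)
          simp at hp; omega
        · intro hil
          have := (hinv i hi).1 (by omega)
          simp; omega
      rw [this]; omega
  | succ n ih =>
      intro low high hf h0 h1 h2 hinv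
      by_cases hlh : low ≤ high
      · rw [bsLoop, dif_pos hlh]
        obtain ⟨hm1, hm2⟩ := PySem.Int.floordiv_two_mid_bounds hlh
        set mid := PySem.Int.floordiv (low + high) 2 with hmiddef
        have hmr1 : 0 ≤ mid := by omega
        have hmr2 : mid < (oc.length : Int) := by omega
        have hget : PySem.List.pyGet? oc mid = some oc[mid.toNat] :=
          PySem.List.pyGet?_eq_some_getElem oc hmr1 hmr2
        dsimp only
        rw [hget]
        dsimp only
        by_cases hv : oc[mid.toNat] < now
        · rw [if_pos hv]
          apply ih (mid + 1) high (by omega) (by omega) h1 (by omega)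
          intro i hi
          refine ⟨?_, (hinv i hi).2⟩
          intro hilt
          by_cases hio : (i : Int) < low
          · exact (hinv i hi).1 hio
          · have hile : i ≤ mid.toNat := by omega
            rcases lt_or_eq_of_le hile with hlt | heq
            · exact lt_of_le_of_lt (hpg i mid.toNat (by omega) (by omega) hlt) hv
            · subst heq; exact hv
        · rw [if_neg hv]
          apply ih low (mid - 1) (by omega) h0 (by omega) (by omega)
          intro i hi
          refine ⟨(hinv i hi).1, ?_⟩
          intro hgt
          by_cases hio : high < (i : Int)
          · exact (hinv i hi).2 hio
          · have hge : mid.toNat ≤ i := by omega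
            rcases lt_or_eq_of_le hge with hlt | heq
            · intro hcon
              exact hv (lt_of_le_of_lt (hpg mid.toNat i (by omega) hi hlt) hcon)
            · subst heq; exact hv
      · rw [bsLoop, dif_neg hlh]
        have : oc.countP (fun y => decide (y < now)) = low.toNat := by
          apply pv_countP_eq _ _ _ (by omega)
          intro i hi
          constructor
          · intro hp
            by_contra hni
            have := (hinv i hi).2 (by omega)
            simp at hp; omega
          · intro hil
            have := (hinv i hi).1 (by omega)
            simp; omega
        rw [this]; omega

-- ---------- the multiset of sums A enumerates ----------
def sumsStep (dice : List (List Int)) (L : List Int) (i : Int) : List Int :=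
  L.flatMap (fun s => ((PySem.List.pyGet? dice i).getD []).map (fun d => s + d))

def sumsFold (dice : List (List Int)) (case : List Int) (L : List Int) : List Int :=
  case.foldl (sumsStep dice) L

def ASums (dice : List (List Int)) (case : List Int) : List Int := sumsFold dice case [0]

theorem sumsFold_nil (dice : List (List Int)) : ∀ (case : List Int),
    sumsFold dice case [] = [] := by
  intro case
  induction case with
  | nil => rfl
  | cons i cs ih => simpa [sumsFold, sumsStep] using ih

theorem sumsFold_append (dice : List (List Int)) : ∀ (case : List Int) (L1 L2 : List Int),
    sumsFold dice case (L1 ++ L2) = sumsFold dice case L1 ++ sumsFold dice case L2 := by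
  intro case
  induction case with
  | nil => intro L1 L2; rfl
  | cons i cs ih =>
      intro L1 L2
      show sumsFold dice cs (sumsStep dice (L1 ++ L2) i)
          = sumsFold dice cs (sumsStep dice L1 i) ++ sumsFold dice cs (sumsStep dice L2 i)
      rw [show sumsStep dice (L1 ++ L2) i = sumsStep dice L1 i ++ sumsStep dice L2 i by
        simp [sumsStep]]
      exact ih _ _

theorem sumsFold_flatMap (dice : List (List Int)) (case : List Int) {β : Type}
    (l : List β) (g : β → List Int) :
    sumsFold dice case (l.flatMap g) = l.flatMap (fun x => sumsFold dice case (g x)) := by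
  induction l with
  | nil => simp [sumsFold_nil]
  | cons x xs ih => simp [List.flatMap_cons, sumsFold_append, ih]

theorem pv_map_eq_flatMap (l : List Int) (f : Int → Int) :
    l.map f = l.flatMap (fun d => [f d]) := by
  induction l with
  | nil => rfl
  | cons a t ih => simp [ih]

theorem dfs_eq (dice : List (List Int)) : ∀ (fuel : Nat) (case : List Int) (k : Nat),
    case.length - k ≤ fuel → k ≤ case.length → ∀ (now : Int) (res : List Int),
    dfs case dice (k : Int) now res = res ++ sumsFold dice (case.drop k) [now] := by
  intro fuel
  induction fuel with
  | zero =>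
      intro case k hf hk now res
      have hkl : k = case.length := by omega
      rw [dfs, if_pos (by omega), hkl]
      simp [sumsFold]
  | succ n ih =>
      intro case k hf hk now res
      by_cases hkl : k = case.length
      · rw [dfs, if_pos (by omega), hkl]
        simp [sumsFold]
      · have hklt : k < case.length := by omega
        rw [dfs, if_neg (by omega)]
        have hget : PySem.List.pyGet? case (k : Int) = some case[k] := by
          simp [PySem.List.pyGet?_natCast, List.getElem?_eq_getElem hklt]
        split
        next heq => rw [hget] at heq; simp at heq
        next dice_idx heq =>
        rw [hget] at heq
        injection heq with h2
        subst h2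
        rw [List.foldl_attach (f := fun r d => dfs case dice ((k : Int) + 1) (now + d) r)]
        have inner : ∀ (faces : List Int) (res : List Int),
            faces.foldl (fun r d => dfs case dice ((k : Int) + 1) (now + d) r) res
              = res ++ faces.flatMap (fun d => sumsFold dice (case.drop (k + 1)) [now + d]) := by
          intro faces
          induction faces with
          | nil => intro res; simp
          | cons d ds ihd =>
              intro res
              have hcast : ((k : Int) + 1) = ((k + 1 : Nat) : Int) := by push_cast; ring
              simp only [List.foldl_cons, List.flatMap_cons]
              rw [ihd, hcast, ih case (k + 1) (by omega) (by omega), List.append_assoc]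
        rw [inner]
        congr 1
        rw [List.drop_eq_getElem_cons hklt]
        rw [show sumsFold dice (case[k] :: case.drop (k + 1)) [now]
            = sumsFold dice (case.drop (k + 1)) (sumsStep dice [now] (case[k])) from rfl]
        rw [show sumsStep dice [now] (case[k])
            = ((PySem.List.pyGet? dice case[k]).getD []).flatMap (fun d => [now + d]) by
          simp [sumsStep]
          exact pv_map_eq_flatMap _ _]
        rw [sumsFold_flatMap]

theorem dfs_zero (dice : List (List Int)) (case : List Int) :
    dfs case dice 0 0 [] = ASums dice case := by
  have := dfs_eq dice case.length case 0 (by omega) (by omega) 0 []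
  simpa [ASums] using this

-- ---------- histogram (dict) side ----------
theorem inner_getD (s c : Int) (v : Int) : ∀ (faces : List Int) (nh : PySem.Dict Int Int),
    (faces.foldl (fun nh2 f => nh2.insert (s + f) (nh2.getD (s + f) 0 + c)) nh).getD v 0
      = nh.getD v 0 + c * (faces.count (v - s) : Int) := by
  intro faces
  induction faces with
  | nil => intro nh; simp
  | cons f fs ih =>
      intro nh
      simp only [List.foldl_cons]
      rw [ih]
      rw [PySem.Dict.getD_insert]
      by_cases hv : v = s + f
      · rw [if_pos hv]
        have : (f == v - s) = true := by simp; omega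
        rw [List.count_cons, this, hv]
        simp
        ring
      · rw [if_neg hv]
        have : (f == v - s) = false := by simp; omega
        rw [List.count_cons, this]
        push_cast
        ring

theorem conv_getD_aux (faces : List Int) (v : Int) : ∀ (items : List (Int × Int)) (nh : PySem.Dict Int Int),
    (items.foldl (fun nh p => faces.foldl
        (fun nh2 f => nh2.insert (p.1 + f) (nh2.getD (p.1 + f) 0 + p.2)) nh) nh).getD v 0
      = nh.getD v 0 + (items.map (fun p => p.2 * (faces.count (v - p.1) : Int))).sum := by
  intro items
  induction items with
  | nil => intro nh; simp
  | cons p ps ih =>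
      intro nh
      simp only [List.foldl_cons, List.map_cons, List.sum_cons]
      rw [ih, inner_getD]
      ring

theorem conv_getD (h : PySem.Dict Int Int) (faces : List Int) (v : Int) :
    (convStep h faces).getD v 0 = (h.items.map (fun p => p.2 * (faces.count (v - p.1) : Int))).sum := by
  rw [convStep, conv_getD_aux]
  simp

theorem conv_nodup (h : PySem.Dict Int Int) (faces : List Int) :
    (convStep h faces).keys.Nodup := by
  rw [convStep]
  have : ∀ (items : List (Int × Int)) (nh : PySem.Dict Int Int), nh.keys.Nodup →
      (items.foldl (fun nh p => faces.foldl
        (fun nh2 f => nh2.insert (p.1 + f) (nh2.getD (p.1 + f) 0 + p.2)) nh) nh).keys.Nodup := by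
    intro items
    induction items with
    | nil => intro nh hn; exact hn
    | cons p ps ih =>
        intro nh hn
        simp only [List.foldl_cons]
        exact ih _ (PySem.Dict.nodup_keys_foldl_insert_key faces (fun f => p.1 + f)
          (fun d x => d.getD (p.1 + x) 0 + p.2) nh hn)
  exact this _ _ PySem.Dict.nodup_keys_empty

-- ---------- generic counting sums ----------
theorem count_map_add (s v : Int) : ∀ (faces : List Int),
    (faces.map (fun d => s + d)).count v = faces.count (v - s) := by
  intro faces
  induction faces with
  | nil => rfl
  | cons f fs ih =>
      simp only [List.map_cons, List.count_cons, ih]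
      have : (s + f == v) = (f == v - s) := by
        by_cases h : f = v - s
        · have h2 : s + f = v := by omega
          simp [h, h2]
        · have h2 : ¬ (s + f = v) := by omega
          simp [h, h2]
      rw [this]
  
theorem count_flatMap (faces : List Int) (v : Int) : ∀ (L : List Int),
    (((L.flatMap (fun s => faces.map (fun d => s + d))).count v : Nat) : Int)
      = (L.map (fun s => (faces.count (v - s) : Int))).sum := by
  intro L
  induction L with
  | nil => rfl
  | cons s L ih =>
      rw [List.flatMap_cons, List.count_append, List.map_cons, List.sum_cons]
      push_cast
      rw [count_map_add, ih]

theorem sum_map_split (g : Int → Int) (s : Int) : ∀ (L : List Int),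
    (L.map g).sum = (L.count s : Int) * g s + ((L.filter (fun x => !(x == s))).map g).sum := by
  intro L
  induction L with
  | nil => simp
  | cons x xs ih =>
      by_cases h : x = s
      · subst h
        have hf : List.filter (fun y => !(y == x)) (x :: xs) = List.filter (fun y => !(y == x)) xs := by
          simp [List.filter_cons]
        have hcn : (x :: xs).count x = xs.count x + 1 := by simp [List.count_cons]
        rw [List.map_cons, List.sum_cons, hf, hcn, ih]
        push_cast
        ring
      · have hf : List.filter (fun y => !(y == s)) (x :: xs) = x :: List.filter (fun y => !(y == s)) xs := by
          simp [List.filter_cons, h]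
        have hcn : (x :: xs).count s = xs.count s := by simp [List.count_cons, h]
        rw [List.map_cons, List.sum_cons, hf, hcn, List.map_cons, List.sum_cons, ih]
        ring

theorem keysum_eq (g : Int → Int) : ∀ (keysl : List Int) (L : List Int) (cnt : Int → Int),
    keysl.Nodup → (∀ v ∈ keysl, cnt v = (L.count v : Int)) → (∀ v ∈ L, v ∈ keysl) →
    (keysl.map (fun s => cnt s * g s)).sum = (L.map g).sum := by
  intro keysl
  induction keysl with
  | nil =>
      intro L cnt _ _ hcov
      have : L = [] := List.eq_nil_iff_forall_not_mem.mpr (fun x hx => List.not_mem_nil (hcov x hx))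
      simp [this]
  | cons s rest ih =>
      intro L cnt hnd hcnt hcov
      simp only [List.map_cons, List.sum_cons]
      rw [sum_map_split g s L]
      have hrest := ih (L.filter (fun x => !(x == s))) cnt (List.Nodup.of_cons hnd) ?_ ?_
      · rw [hrest, hcnt s (List.mem_cons_self)]
      · intro v hv
        have hvs : ¬ (v = s) := by
          intro hvv; subst hvv
          exact (List.nodup_cons.1 hnd).1 hv
        rw [hcnt v (List.mem_cons_of_mem _ hv)]
        congr 1
        exact (List.count_filter (p := fun x => !(x == s)) (by simp [hvs])).symm
      · intro v hv
        have h1 := List.mem_filter.1 hv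
        have hvs : ¬ (v = s) := by simpa using h1.2
        rcases List.mem_cons.1 (hcov v h1.1) with h | h
        · exact absurd h hvs
        · exact h

-- getD = count transfers through one convolution step
theorem conv_step_count (h : PySem.Dict Int Int) (faces : List Int) (L : List Int)
    (hn : h.keys.Nodup) (hc : ∀ v, h.getD v 0 = (L.count v : Int)) (v : Int) :
    (convStep h faces).getD v 0 = ((L.flatMap (fun s => faces.map (fun d => s + d))).count v : Int) := by
  rw [conv_getD, PySem.Dict.items_eq_map_keys h hn 0, List.map_map]
  rw [count_flatMap]
  exact keysum_eq (fun s => (faces.count (v - s) : Int)) h.keys L (fun k => h.getD k 0) hn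
    (fun w _ => hc w)
    (fun w hw => by
      by_contra hnk
      have hcont : h.contains w = false := by
        rcases Bool.eq_false_or_eq_true (h.contains w) with ht | hf
        · exact absurd ((PySem.Dict.contains_iff_mem_keys h w).1 ht) hnk
        · exact hf
      have := hc w
      rw [PySem.Dict.getD_of_not_contains h 0 hcont] at this
      have : L.count w = 0 := by omega
      exact (List.count_eq_zero.1 this) hw)

theorem histFold_spec (dice : List (List Int)) : ∀ (case : List Int) (h : PySem.Dict Int Int) (L : List Int),
    h.keys.Nodup → (∀ v, h.getD v 0 = (L.count v : Int)) →
    (case.foldl (fun h i => convStep h ((PySem.List.pyGet? dice i).getD [])) h).keys.Nodup ∧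
    (∀ v, (case.foldl (fun h i => convStep h ((PySem.List.pyGet? dice i).getD [])) h).getD v 0
      = ((sumsFold dice case L).count v : Int)) := by
  intro case
  induction case with
  | nil => intro h L hn hc; exact ⟨hn, hc⟩
  | cons i cs ih =>
      intro h L hn hc
      simp only [List.foldl_cons]
      exact ih (convStep h ((PySem.List.pyGet? dice i).getD [])) (sumsStep dice L i)
        (conv_nodup _ _) (fun v => conv_step_count h _ L hn hc v)

theorem histOf_spec (dice : List (List Int)) (case : List Int) :
    (histOf dice case).keys.Nodup ∧
    (∀ v, (histOf dice case).getD v 0 = ((ASums dice case).count v : Int)) := by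
  rw [histOf, ASums]
  apply histFold_spec dice case _ [0]
  · exact PySem.Dict.nodup_keys_insert _ _ _ PySem.Dict.nodup_keys_empty
  · intro v
    rw [PySem.Dict.getD_insert]
    by_cases hv : v = 0
    · subst hv; simp
    · rw [if_neg hv, PySem.Dict.getD_empty]
      have : [(0 : Int)].count v = 0 := by
        simp [List.count_cons, hv]
        omega
      rw [this]
      simp

-- ---------- B's merge loop ----------
theorem advance_spec (s : Int) : ∀ (rem : List (Int × Int)) (acc : Int),
    advance rem s acc = (rem.dropWhile (fun p => decide (p.1 < s)),
      acc + ((rem.takeWhile (fun p => decide (p.1 < s))).map Prod.snd).sum) := by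
  intro rem
  induction rem with
  | nil => intro acc; simp [advance]
  | cons p rest ih =>
      intro acc
      obtain ⟨t, d⟩ := p
      by_cases h : t < s
      · rw [show advance ((t, d) :: rest) s acc = advance rest s (acc + d) by simp [advance, h]]
        rw [ih]
        rw [List.dropWhile_cons_of_pos (by simp [h]), List.takeWhile_cons_of_pos (by simp [h])]
        simp only [List.map_cons, List.sum_cons]
        rw [add_assoc]
      · rw [show advance ((t, d) :: rest) s acc = ((t, d) :: rest, acc) by simp [advance, h]]
        rw [List.dropWhile_cons_of_neg (by simp [h]), List.takeWhile_cons_of_neg (by simp [h])]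
        simp

theorem filter_eq_takeWhile (s : Int) : ∀ (l : List (Int × Int)),
    (l.map Prod.fst).Pairwise (· ≤ ·) →
    l.filter (fun p => decide (p.1 < s)) = l.takeWhile (fun p => decide (p.1 < s)) := by
  intro l
  induction l with
  | nil => intro _; rfl
  | cons p rest ih =>
      intro hp
      rw [List.map_cons, List.pairwise_cons] at hp
      by_cases h : p.1 < s
      · rw [List.filter_cons_of_pos (by simp [h]), List.takeWhile_cons_of_pos (by simp [h])]
        rw [ih hp.2]
      · rw [List.filter_cons_of_neg (by simp [h]), List.takeWhile_cons_of_neg (by simp [h])]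
        apply List.filter_eq_nil_iff.2
        intro q hq
        have : p.1 ≤ q.1 := hp.1 q.1 (List.mem_map_of_mem hq)
        simp
        omega

theorem winsLoop_spec (h : PySem.Dict Int Int) : ∀ (keys : List Int) (pre rem : List (Int × Int)) (wins : Int),
    ((pre ++ rem).map Prod.fst).Pairwise (· ≤ ·) → keys.Pairwise (· ≤ ·) →
    (∀ t ∈ pre.map Prod.fst, ∀ s ∈ keys, t < s) →
    winsLoop h keys rem ((pre.map Prod.snd).sum) wins
      = wins + (keys.map (fun s => h.getD s 0 *
          ((((pre ++ rem).filter (fun p => decide (p.1 < s))).map Prod.snd).sum))).sum := by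
  intro keys
  induction keys with
  | nil => intro pre rem wins _ _ _; simp [winsLoop]
  | cons s ks ih =>
      intro pre rem wins hsorted hks hlt
      rw [show winsLoop h (s :: ks) rem ((pre.map Prod.snd).sum) wins
          = winsLoop h ks (advance rem s ((pre.map Prod.snd).sum)).1
              (advance rem s ((pre.map Prod.snd).sum)).2
              (wins + h.getD s 0 * (advance rem s ((pre.map Prod.snd).sum)).2) from rfl]
      rw [advance_spec]
      dsimp only
      set q : Int × Int → Bool := fun p => decide (p.1 < s) with hq
      set pre' := pre ++ rem.takeWhile q with hpre'
      have hpr : pre' ++ rem.dropWhile q = pre ++ rem := by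
        rw [hpre', List.append_assoc, List.takeWhile_append_dropWhile]
      have hacc : (pre.map Prod.snd).sum + ((rem.takeWhile q).map Prod.snd).sum
          = (pre'.map Prod.snd).sum := by
        rw [hpre', List.map_append, List.sum_append]
      have hks' : ks.Pairwise (· ≤ ·) := (List.pairwise_cons.1 hks).2
      have hsles : ∀ s' ∈ ks, s ≤ s' := (List.pairwise_cons.1 hks).1
      have hlt' : ∀ t ∈ pre'.map Prod.fst, ∀ s' ∈ ks, t < s' := by
        intro t ht s' hs'
        rw [hpre', List.map_append] at ht
        rcases List.mem_append.1 ht with h1 | h1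
        · exact lt_of_lt_of_le (hlt t h1 s (List.mem_cons_self)) (hsles s' hs')
        · obtain ⟨p, hp, rfl⟩ := List.mem_map.1 h1
          have hqp := List.mem_takeWhile_imp hp
          rw [hq] at hqp
          simp at hqp
          exact lt_of_lt_of_le hqp (hsles s' hs')
      rw [hacc]
      rw [ih pre' (rem.dropWhile q) _ (by rw [hpr]; exact hsorted) hks' hlt']
      rw [hpr]
      have hfil : (pre ++ rem).filter q = pre' := by
        rw [List.filter_append, hpre']
        congr 1
        · apply List.filter_eq_self.2
          intro p hp
          have := hlt p.1 (List.mem_map_of_mem hp) s (List.mem_cons_self)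
          rw [hq]
          simp
          omega
        · apply filter_eq_takeWhile
          have hsub : rem.Sublist (pre ++ rem) := List.sublist_append_right pre rem
          exact List.Pairwise.sublist (List.Sublist.map Prod.fst hsub) hsorted
      rw [List.map_cons, List.sum_cons, hfil]
      ring

theorem binary_search_eq (oc : List Int) (now : Int) (hs : oc.Pairwise (· ≤ ·)) :
    binary_search now oc = ((oc.countP (fun y => decide (y < now)) : Nat) : Int) := by
  rw [binary_search]
  apply bsLoop_eq oc now hs ((oc.length : Int) - 0).toNat 0 ((oc.length : Int) - 1)
    (by omega) (by omega) (by omega) (by omega)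
  intro i hi
  constructor
  · intro h; omega
  · intro h; omega

theorem sum_filter_ite (f : Int → Int) (p : Int → Bool) : ∀ (l : List Int),
    ((l.filter p).map f).sum = (l.map (fun x => f x * (if p x = true then 1 else 0))).sum := by
  intro l
  induction l with
  | nil => rfl
  | cons x xs ih =>
      by_cases h : p x
      · rw [List.filter_cons_of_pos h, List.map_cons, List.sum_cons, ih, List.map_cons,
          List.sum_cons, if_pos h]
        ring
      · rw [List.filter_cons_of_neg (by simp [h]), List.map_cons, List.sum_cons, ih,
          if_neg (by simp [h])]
        ring

theorem cover_of_getD (hd : PySem.Dict Int Int) (L : List Int)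
    (hc : ∀ v, hd.getD v 0 = (L.count v : Int)) : ∀ v ∈ L, v ∈ hd.keys := by
  intro w hw
  by_contra hnk
  have hcont : hd.contains w = false := by
    rcases Bool.eq_false_or_eq_true (hd.contains w) with ht | hf
    · exact absurd ((PySem.Dict.contains_iff_mem_keys hd w).1 ht) hnk
    · exact hf
  have := hc w
  rw [PySem.Dict.getD_of_not_contains hd 0 hcont] at this
  have : L.count w = 0 := by omega
  exact (List.count_eq_zero.1 this) hw

-- the per-pair score equality: B's histogram merge = A's sorted-list binary-search sum
theorem pair_temp (Lmy Lother : List Int) (hmy hot : PySem.Dict Int Int)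
    (h1 : hmy.keys.Nodup) (h2 : ∀ v, hmy.getD v 0 = (Lmy.count v : Int))
    (h3 : hot.keys.Nodup) (h4 : ∀ v, hot.getD v 0 = (Lother.count v : Int)) :
    winsLoop hmy (PySem.List.sorted hmy.keys (fun x => x) false)
        ((PySem.List.sorted hot.keys (fun x => x) false).map (fun t => (t, hot.getD t 0))) 0 0
      = (PySem.List.sorted Lmy (fun x => x) false).foldl
          (fun t num => t + binary_search num (PySem.List.sorted Lother (fun x => x) false)) 0 := by
  set W : Int → Int := fun x => ((Lother.countP (fun y => decide (y < x)) : Nat) : Int) with hW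
  -- A side
  have hA : (PySem.List.sorted Lmy (fun x => x) false).foldl
      (fun t num => t + binary_search num (PySem.List.sorted Lother (fun x => x) false)) 0
      = (Lmy.map W).sum := by
    rw [PySem.List.foldl_add]
    rw [zero_add]
    have hOCs : (PySem.List.sorted Lother (fun x => x) false).Pairwise (· ≤ ·) :=
      PySem.List.sorted_pairwise Lother (fun x => x)
    have hbs : ∀ num : Int, binary_search num (PySem.List.sorted Lother (fun x => x) false)
        = W num := by
      intro num
      rw [binary_search_eq _ num hOCs, hW]
      congr 1
      exact List.Perm.countP_congr (PySem.List.sorted_perm Lother (fun x => x) false)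
        (fun x _ => rfl)
    rw [List.map_congr_left (fun num _ => hbs num)]
    exact List.Perm.sum_eq (List.Perm.map W (PySem.List.sorted_perm Lmy (fun x => x) false))
  -- B side
  have hkl2nd : (PySem.List.sorted hot.keys (fun x => x) false).Nodup :=
    (List.Perm.nodup_iff (PySem.List.sorted_perm hot.keys (fun x => x) false)).2 h3
  have hkl1nd : (PySem.List.sorted hmy.keys (fun x => x) false).Nodup :=
    (List.Perm.nodup_iff (PySem.List.sorted_perm hmy.keys (fun x => x) false)).2 h1
  have hB := winsLoop_spec hmy (PySem.List.sorted hmy.keys (fun x => x) false) []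
    ((PySem.List.sorted hot.keys (fun x => x) false).map (fun t => (t, hot.getD t 0))) 0
    (by
      simp only [List.nil_append, List.map_map]
      have : (Prod.fst ∘ fun t => (t, hot.getD t 0)) = fun t : Int => t := rfl
      rw [this, List.map_id']
      exact PySem.List.sorted_pairwise hot.keys (fun x => x))
    (PySem.List.sorted_pairwise hmy.keys (fun x => x))
    (by intro t ht; simp at ht)
  simp only [List.map_nil, List.sum_nil, List.nil_append, zero_add] at hB
  rw [hB]
  have hinner : ∀ s : Int,
      ((((PySem.List.sorted hot.keys (fun x => x) false).map
          (fun t => (t, hot.getD t 0))).filter (fun p => decide (p.1 < s))).map Prod.snd).sum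
        = W s := by
    intro s
    rw [List.filter_map, List.map_map]
    have hcomp1 : ((fun p : Int × Int => decide (p.1 < s)) ∘ fun t => (t, hot.getD t 0))
        = fun t : Int => decide (t < s) := rfl
    have hcomp2 : (Prod.snd ∘ fun t : Int => (t, hot.getD t 0)) = fun t => hot.getD t 0 := rfl
    rw [hcomp1, hcomp2]
    rw [sum_filter_ite (fun t => hot.getD t 0) (fun t => decide (t < s))]
    rw [keysum_eq (fun x => if decide (x < s) = true then 1 else 0)
      (PySem.List.sorted hot.keys (fun x => x) false) Lother (fun t => hot.getD t 0)
      hkl2nd (fun v _ => h4 v)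
      (fun v hv => (PySem.List.mem_sorted hot.keys (fun x => x) false v).2
        (cover_of_getD hot Lother h4 v hv))]
    rw [PySem.List.sum_map_ite_one_zero (fun y => decide (y < s)) Lother]
  rw [List.map_congr_left (fun s _ => by rw [hinner s])]
  rw [keysum_eq W (PySem.List.sorted hmy.keys (fun x => x) false) Lmy (fun t => hmy.getD t 0)
    hkl1nd (fun v _ => h2 v)
    (fun v hv => (PySem.List.mem_sorted hmy.keys (fun x => x) false v).2
      (cover_of_getD hmy Lmy h2 v hv))]
  rw [hA]

theorem enumerate_map {α β : Type} (f : α → β) : ∀ (xs : List α) (s : Int),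
    PySem.List.enumerate (xs.map f) s = (PySem.List.enumerate xs s).map (fun p => (p.1, f p.2)) := by
  intro xs
  induction xs with
  | nil => intro s; rfl
  | cons x xs ih =>
      intro s
      rw [List.map_cons, PySem.List.enumerate_cons, PySem.List.enumerate_cons, ih, List.map_cons]

theorem foldl_rel {γ : Type} : ∀ (l : List γ) (fA : Int × List Int → γ → Int × List Int)
    (fB : List Int × Int → γ → List Int × Int),
    (∀ p ∈ l, ∀ (x : Int × List Int) (y : List Int × Int),
      x.1 = y.2 → x.2 = y.1 → (fA x p).1 = (fB y p).2 ∧ (fA x p).2 = (fB y p).1) →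
    ∀ (a : Int × List Int) (b : List Int × Int), a.1 = b.2 → a.2 = b.1 →
    (l.foldl fA a).1 = (l.foldl fB b).2 ∧ (l.foldl fA a).2 = (l.foldl fB b).1 := by
  intro l
  induction l with
  | nil => intro fA fB _ a b h1 h2; exact ⟨h1, h2⟩
  | cons p ps ih =>
      intro fA fB hstep a b h1 h2
      have hh := hstep p (List.mem_cons_self) a b h1 h2
      exact ih fA fB (fun q hq => hstep q (List.mem_cons_of_mem _ hq)) _ _ hh.1 hh.2

theorem solution_eq_alt (dice : List (List Int)) : solution dice = solution_alt dice := by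
  simp only [solution, solution_alt]
  set CS := PySem.List.combinations (PySem.List.pyRange 0 (PySem.List.len dice) 1)
    (dice.length / 2) with hCS
  set SC := List.foldl
    (fun (d : PySem.Dict Int (List Int)) (p : Int × List Int) =>
      d.insert p.1 (PySem.List.sorted (dfs p.2 dice 0 0 []) (fun x => x) false))
    PySem.Dict.empty (PySem.List.enumerate CS 0) with hSC
  have hitems : SC.items = (PySem.List.enumerate CS 0).map
      (fun p => (p.1, PySem.List.sorted (dfs p.2 dice 0 0 []) (fun x => x) false)) := by
    rw [hSC]
    rw [PySem.Dict.items_foldl_insert_fresh (PySem.List.enumerate CS 0) (fun p => p.1)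
      (fun p => PySem.List.sorted (dfs p.2 dice 0 0 []) (fun x => x) false) PySem.Dict.empty
      (fun a _ => PySem.Dict.contains_empty _)
      (by rw [PySem.List.map_fst_enumerate]; exact PySem.List.nodup_pyRange_one _ _)]
    rfl
  have hkeysnd : SC.keys.Nodup := by
    have hk : SC.keys = (PySem.List.enumerate CS 0).map (fun p => p.1) := by
      simp only [PySem.Dict.keys, hitems, List.map_map]
      rfl
    rw [hk, PySem.List.map_fst_enumerate]
    exact PySem.List.nodup_pyRange_one _ _
  have hget : ∀ (j : Nat) (hj : j < CS.length),
      SC.get? ((j : Nat) : Int)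
        = some (PySem.List.sorted (dfs (CS[j]'hj) dice 0 0 []) (fun x => x) false) := by
    intro j hj
    apply PySem.Dict.get?_of_mem_items _ ?_ hkeysnd
    rw [hitems]
    apply List.mem_map.2
    refine ⟨((0 : Int) + (j : Int), CS[j]), (PySem.List.mem_enumerate_iff CS 0 _).2 ⟨j, hj, rfl⟩, ?_⟩
    simp
  have hpyCS : ∀ (j : Nat) (hj : j < CS.length),
      (PySem.List.pyGet? CS ((j : Nat) : Int)).getD [] = CS[j]'hj := by
    intro j hj
    simp [List.getElem?_eq_getElem hj]
  have hpyH : ∀ (j : Nat) (hj : j < CS.length),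
      (PySem.List.pyGet? (CS.map (histOf dice)) ((j : Nat) : Int)).getD PySem.Dict.empty
        = histOf dice (CS[j]'hj) := by
    intro j hj
    rw [PySem.List.pyGet?_natCast]
    simp [List.getElem?_map, List.getElem?_eq_getElem hj]
  have hsorted_self : ∀ (j : Nat) (hj : j < CS.length),
      PySem.List.sorted (CS[j]'hj) (fun x => x) false = CS[j]'hj := by
    intro j hj
    apply PySem.List.sorted_eq_self_of_pairwise
    have hmem : CS[j] ∈ PySem.List.combinations (PySem.List.pyRange 0 (PySem.List.len dice) 1)
        (dice.length / 2) := List.getElem_mem hj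
    have hsub := PySem.List.sublist_of_mem_combinations hmem
    have hpr := PySem.List.pairwise_lt_pyRange_one 0 (PySem.List.len dice)
    exact (List.Pairwise.sublist hsub hpr).imp (fun h => le_of_lt h)
  rw [hitems, List.foldl_map, enumerate_map (histOf dice) CS 0, List.foldl_map]
  congr 1
  refine (foldl_rel (PySem.List.enumerate CS 0) _ _ ?hstep (0, []) ([], 0) rfl rfl).2
  intro p hp x y hxy1 hxy2
  obtain ⟨k, hk, rfl⟩ := (PySem.List.mem_enumerate_iff CS 0 p).1 hp
  dsimp only
  have hjlt : CS.length - 1 - k < CS.length := by omega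
  have hidx : PySem.List.len CS - 1 - ((0 : Int) + (k : Int))
      = ((CS.length - 1 - k : Nat) : Int) := by
    rw [PySem.List.len_eq]; omega
  have hzk : ((0 : Int) + (k : Int)) = ((k : Nat) : Int) := by omega
  have hrewA : (SC.get? (PySem.List.len CS - 1 - ((0 : Int) + (k : Int)))).getD []
      = PySem.List.sorted (ASums dice (CS[CS.length - 1 - k]'hjlt)) (fun x => x) false := by
    rw [hidx, hget (CS.length - 1 - k) hjlt]
    simp only [Option.getD_some, dfs_zero]
  have hrewB : (PySem.List.pyGet? (CS.map (histOf dice))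
        (PySem.List.len CS - 1 - ((0 : Int) + (k : Int)))).getD PySem.Dict.empty
      = histOf dice (CS[CS.length - 1 - k]'hjlt) := by
    rw [hidx, hpyH (CS.length - 1 - k) hjlt]
  rw [hrewA, hrewB]
  simp only [dfs_zero]
  rw [pair_temp (ASums dice (CS[k]'hk)) (ASums dice (CS[CS.length - 1 - k]'hjlt))
    (histOf dice (CS[k]'hk)) (histOf dice (CS[CS.length - 1 - k]'hjlt))
    (histOf_spec dice (CS[k]'hk)).1 (histOf_spec dice (CS[k]'hk)).2
    (histOf_spec dice (CS[CS.length - 1 - k]'hjlt)).1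
    (histOf_spec dice (CS[CS.length - 1 - k]'hjlt)).2]
  rw [hxy1]
  have hpk : (PySem.List.pyGet? CS ((0 : Int) + (k : Int))).getD [] = CS[k]'hk := by
    rw [hzk]; exact hpyCS k hk
  split_ifs with hcond
  · refine ⟨rfl, ?_⟩
    rw [hpk, hsorted_self k hk]
  · exact ⟨hxy1, hxy2⟩

-- ===== VERDICT (by name: the statement is the Claim_ definition above) =====
theorem solution_spec : Claim_equal_solution := by
  intro dice _
  unfold Spec_solution
  exact solution_eq_alt dice
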